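-- pv_equiv track=rewrite | github.com/lgj9172/algorithm | programers/셔틀버스.py | solution
-- ===== SOURCE A (Python) =====
-- def minute(time_text):
--     minute = int(time_text[0:2]) * 60
--     minute += int(time_text[3:5])
--     return minute
--
-- def solution(n, t, m, timetable):
--     bus_timetable = [minute("09:00") + num * t for num in range(n)]
--     crew_timetable = [minute(time) for time in sorted(timetable)]
--     crew_index = 0
--     answer = 0
--     for bus_time in bus_timetable:
--         count = 0
--         # 현재 버스시간보다 빨리 도착해 있는 사람은 모두 탑승
--         while crew_index <= len(crew_timetable) - 1:
--             crew_time = crew_timetable[crew_index]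
--             if count < m and crew_time <= bus_time:
--                 count += 1
--                 crew_index += 1
--             else:
--                 break
--         # 이 버스가 가득차지 않았으면, 버스도착할때 동시에 도착하면된다.
--         if count < m:
--             answer = bus_time
--         # 이 버스가 가득찼으면, 마지막 사람 오기 1분전에 줄선다.
--         elif count == m:
--             answer = crew_timetable[crew_index - 1] - 1
--     h = answer // 60
--     m = answer % 60
--     return f"{h:02}:{m:02}"
-- ===== SOURCE B (Python) =====
-- def solution(n, t, m, timetable):
--     # Per-bus arithmetic instead of a stateful passenger pointer: for each bus,
--     # count how many crew have arrived, clamp that into what the buses so far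
--     # could have carried, and read the answer off the capacity comparison.
--     crew = [int(s[0:2]) * 60 + int(s[3:5]) for s in sorted(timetable)]
--     boarded = 0
--     answer = 0
--     for k in range(n):
--         bus = 540 + k * t
--         arrived = sum(1 for c in crew if c <= bus)
--         reach = min(max(arrived, boarded), boarded + m)
--         answer = bus if reach - boarded < m else crew[reach - 1] - 1
--         boarded = reach
--     h, mm = divmod(answer, 60)
--     return f"{h:02}:{mm:02}"
-- ===== Notes on version B (the rewrite author's own statement) =====
-- stated objective: alternative
-- what changed: A's stateful inner while loop (a crew pointer advanced one passenger at a time, with a per-bus count) is replaced by stateless per-bus arithmetic: count the crew arrived by each bus time, clamp it into [boarded, boarded+m], and read the answer off the capacity comparison; Pre_ excludes non-'HH:MM' entries and m <= 0 (with buses), where A's value rests on lexicographic-vs-minute sort mismatch or negative-index wraparound.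
-- outside the precondition, e.g. on solution(1, 1, -1, ['09:00']): A returns '00:00', B raises IndexError; on solution(4, 38, 1, ['10:03', '09:77', '10:89']): A returns '10:16', B returns '10:02'; on solution(1, 1, 1, [' 9:05', '09:00']): A returns '09:00', B returns '09:04'
import Mathlib
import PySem

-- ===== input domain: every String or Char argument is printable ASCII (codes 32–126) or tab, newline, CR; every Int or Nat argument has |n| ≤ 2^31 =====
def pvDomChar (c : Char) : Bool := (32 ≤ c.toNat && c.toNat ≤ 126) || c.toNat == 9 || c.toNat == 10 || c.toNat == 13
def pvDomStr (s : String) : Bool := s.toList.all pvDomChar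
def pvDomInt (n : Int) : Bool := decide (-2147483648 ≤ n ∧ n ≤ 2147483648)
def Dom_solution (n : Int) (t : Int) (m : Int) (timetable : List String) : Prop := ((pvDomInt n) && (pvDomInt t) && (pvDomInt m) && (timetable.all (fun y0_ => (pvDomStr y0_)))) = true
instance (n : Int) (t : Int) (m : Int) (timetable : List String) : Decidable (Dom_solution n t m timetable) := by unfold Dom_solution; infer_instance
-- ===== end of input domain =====

-- B replaces A's stateful inner while loop (crew pointer advanced one passenger at a time)
-- by stateless per-bus arithmetic: count the crew arrived by the bus time, clamp it into
-- [boarded, boarded+m], and read the answer off the capacity comparison (objective: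
-- alternative decomposition, similar cost).

-- ===== PORT A =====
def pvMinuteA (time_text : String) : Int :=
  (PySem.Int.ofStr? (PySem.Str.slice time_text (some 0) (some 2))).getD 0 * 60
    + (PySem.Int.ofStr? (PySem.Str.slice time_text (some 3) (some 5))).getD 0

-- the inner "while crew_index <= len(crew_timetable) - 1: …" loop of A
def pvWhileA (crew : List Int) (mcap bus : Int) (idx count : Int) : Int × Int :=
  if _h : idx ≤ (crew.length : Int) - 1 then
    let crewTime := PySem.List.pyGetD crew idx 0
    if count < mcap ∧ crewTime ≤ bus then
      pvWhileA crew mcap bus (idx + 1) (count + 1)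
    else (idx, count)
  else (idx, count)
termination_by ((crew.length : Int) - idx).toNat
decreasing_by omega

def solution (n : Int) (t : Int) (m : Int) (timetable : List String) : String :=
  let bus_timetable := (PySem.List.pyRange 0 n 1).map (fun num => pvMinuteA "09:00" + num * t)
  let crew_timetable := (PySem.List.sorted timetable (fun x => x) false).map pvMinuteA
  let st := bus_timetable.foldl (fun (st : Int × Int) bus_time =>
      let r := pvWhileA crew_timetable m bus_time st.1 0
      if r.2 < m then (r.1, bus_time)
      else if r.2 = m then (r.1, PySem.List.pyGetD crew_timetable (r.1 - 1) 0 - 1)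
      else (r.1, st.2)) ((0 : Int), (0 : Int))
  let answer := st.2
  PySem.Str.join "" [PySem.Str.zfill (PySem.Int.toStr (PySem.Int.floordiv answer 60)) 2, ":",
    PySem.Str.zfill (PySem.Int.toStr (PySem.Int.mod answer 60)) 2]

-- ===== PORT B =====
def solution_alt (n : Int) (t : Int) (m : Int) (timetable : List String) : String :=
  let crew := (PySem.List.sorted timetable (fun x => x) false).map (fun s =>
    (PySem.Int.ofStr? (PySem.Str.slice s (some 0) (some 2))).getD 0 * 60
      + (PySem.Int.ofStr? (PySem.Str.slice s (some 3) (some 5))).getD 0)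
  let st := (PySem.List.pyRange 0 n 1).foldl (fun (st : Int × Int) k =>
      let bus := 540 + k * t
      let arrived := crew.foldl (fun (acc : Int) c => if c ≤ bus then acc + 1 else acc) 0
      let reach := min (max arrived st.1) (st.1 + m)
      (reach, if reach - st.1 < m then bus else PySem.List.pyGetD crew (reach - 1) 0 - 1))
    ((0 : Int), (0 : Int))
  let answer := st.2
  PySem.Str.join "" [PySem.Str.zfill (PySem.Int.toStr (PySem.Int.floordiv answer 60)) 2, ":",
    PySem.Str.zfill (PySem.Int.toStr (PySem.Int.mod answer 60)) 2]

-- ===== PRECONDITION & SPEC =====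
-- a literal clock time "HH:MM": two digits, ':', digit ≤ '5', digit
def pvGoodTime (s : String) : Bool :=
  match s.toList with
  | [a, b, c, d, e] =>
    PySem.Chars.isdigit a && PySem.Chars.isdigit b && (c == ':')
      && (PySem.Chars.isdigit d && decide (d ≤ '5')) && PySem.Chars.isdigit e
  | _ => false

-- Pre_ restricts to the task's natural domain: every timetable entry a literal "HH:MM" with
-- minute part 00–59, and capacity m ≥ 1 (except when n ≤ 0, where no bus runs and m is
-- irrelevant).  Outside it A still returns on some inputs, but those values are artefacts of
-- its implementation: for m ≤ 0 (with buses) the answer comes from negative-index wraparound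
-- (or A raises on an empty crew list), and for minute parts ≥ 60 or int()-parsable-but-padded
-- entries the lexicographic string sort A relies on no longer agrees with arrival-minute order.
def Pre_solution (n : Int) (t : Int) (m : Int) (timetable : List String) : Prop :=
  (1 ≤ m ∨ n ≤ 0) ∧ ∀ s ∈ timetable, pvGoodTime s = true
instance (n : Int) (t : Int) (m : Int) (timetable : List String) : Decidable (Pre_solution n t m timetable) := by
  unfold Pre_solution; infer_instance

def pvWitness_solution : Int × Int × Int × List String := (2, 10, 2, ["09:05", "09:00", "23:59"])

def Spec_solution (n : Int) (t : Int) (m : Int) (timetable : List String) (out : String) : Prop := out = solution_alt n t m timetable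
instance (n : Int) (t : Int) (m : Int) (timetable : List String) (out : String) : Decidable (Spec_solution n t m timetable out) := by unfold Spec_solution; infer_instance

-- ===== CLAIM (what is proved, stated in full; the proofs are below) =====
def Claim_equal_solution : Prop := ∀ (n : Int) (t : Int) (m : Int) (timetable : List String), Dom_solution n t m timetable → Pre_solution n t m timetable → Spec_solution n t m timetable (solution n t m timetable)

-- ===== LEMMAS AND PROOFS =====

def pvDigits : List Char := ['0', '1', '2', '3', '4', '5', '6', '7', '8', '9']

lemma pv_digit_mem {c : Char} (h : PySem.Chars.isdigit c = true) : c ∈ pvDigits := by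
  simp only [PySem.Chars.isdigit, Bool.and_eq_true, decide_eq_true_eq, Char.le_def,
    UInt32.le_iff_toNat_le] at h
  have h' : 48 ≤ c.toNat ∧ c.toNat ≤ 57 := h
  have hc : c.toNat = 48 ∨ c.toNat = 49 ∨ c.toNat = 50 ∨ c.toNat = 51 ∨ c.toNat = 52 ∨
      c.toNat = 53 ∨ c.toNat = 54 ∨ c.toNat = 55 ∨ c.toNat = 56 ∨ c.toNat = 57 := by omega
  have hofn : Char.ofNat c.toNat = c := Char.ofNat_toNat c
  rcases hc with h | h | h | h | h | h | h | h | h | h <;> rw [h] at hofn <;> rw [← hofn] <;> decide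

lemma pv_digit_bounds {c : Char} (h : PySem.Chars.isdigit c = true) :
    48 ≤ c.toNat ∧ c.toNat ≤ 57 := by
  simpa only [PySem.Chars.isdigit, Bool.and_eq_true, decide_eq_true_eq, Char.le_def,
    UInt32.le_iff_toNat_le] using h

lemma pv_goodTime_elim {s : String} (h : pvGoodTime s = true) :
    ∃ a b d e, s.toList = [a, b, ':', d, e] ∧ PySem.Chars.isdigit a = true ∧
      PySem.Chars.isdigit b = true ∧ PySem.Chars.isdigit d = true ∧ d ≤ '5' ∧
      PySem.Chars.isdigit e = true := by
  rcases hl : s.toList with _ | ⟨a, _ | ⟨b, _ | ⟨c, _ | ⟨d, _ | ⟨e, _ | ⟨f, r⟩⟩⟩⟩⟩⟩ <;>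
    simp only [pvGoodTime, hl, Bool.and_eq_true, beq_iff_eq, decide_eq_true_eq] at h <;>
    try exact (Bool.false_ne_true h).elim
  obtain ⟨⟨⟨⟨ha, hb⟩, hc⟩, hd, hd5⟩, he⟩ := h
  exact ⟨a, b, d, e, by simp [hc], ha, hb, hd, hd5, he⟩

lemma pv_two_digit_val {a b : Char} (ha : a ∈ pvDigits) (hb : b ∈ pvDigits) :
    PySem.Int.ofChars? [a, b] = some (10 * (a.toNat : Int) + (b.toNat : Int) - 528) := by
  fin_cases ha <;> fin_cases hb <;> decide

lemma pv_minute_val {s : String} {a b d e : Char} (hs : s.toList = [a, b, ':', d, e])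
    (ha : a ∈ pvDigits) (hb : b ∈ pvDigits) (hd : d ∈ pvDigits) (he : e ∈ pvDigits) :
    pvMinuteA s = 600 * (a.toNat : Int) + 60 * (b.toNat : Int)
      + 10 * (d.toNat : Int) + (e.toNat : Int) - 32208 := by
  have h1 : PySem.Int.ofStr? (PySem.Str.slice s (some 0) (some 2))
      = PySem.Int.ofChars? (PySem.List.slice s.toList (some 0) (some 2)) := by
    simp [PySem.Int.ofStr?]
  have h2 : PySem.Int.ofStr? (PySem.Str.slice s (some 3) (some 5))
      = PySem.Int.ofChars? (PySem.List.slice s.toList (some 3) (some 5)) := by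
    simp [PySem.Int.ofStr?]
  have e1 : PySem.List.slice s.toList (some 0) (some 2) = [a, b] := by
    rw [hs, PySem.List.slice_toNat _ (by norm_num) (by norm_num)]; rfl
  have e2 : PySem.List.slice s.toList (some 3) (some 5) = [d, e] := by
    rw [hs, PySem.List.slice_toNat _ (by norm_num) (by norm_num)]; rfl
  rw [pvMinuteA, h1, h2, e1, e2, pv_two_digit_val ha hb, pv_two_digit_val hd he]
  simp; ring

lemma pv_minute_mono {s u : String} (hs : pvGoodTime s = true) (hu : pvGoodTime u = true)
    (hle : s ≤ u) : pvMinuteA s ≤ pvMinuteA u := by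
  obtain ⟨a, b, d, e, hl, ha, hb, hd, hd5, he⟩ := pv_goodTime_elim hs
  obtain ⟨a', b', d', e', hl', ha', hb', hd', hd5', he'⟩ := pv_goodTime_elim hu
  rw [pv_minute_val hl (pv_digit_mem ha) (pv_digit_mem hb) (pv_digit_mem hd) (pv_digit_mem he),
    pv_minute_val hl' (pv_digit_mem ha') (pv_digit_mem hb') (pv_digit_mem hd') (pv_digit_mem he')]
  have Ba := pv_digit_bounds ha; have Bb := pv_digit_bounds hb
  have Bd := pv_digit_bounds hd; have Be := pv_digit_bounds he
  have Ba' := pv_digit_bounds ha'; have Bb' := pv_digit_bounds hb'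
  have Bd' := pv_digit_bounds hd'; have Be' := pv_digit_bounds he'
  have H5 : d.toNat ≤ 53 := hd5
  have H5' : d'.toNat ≤ 53 := hd5'
  rw [String.le_iff_toList_le, hl, hl'] at hle
  have key : a.toNat < a'.toNat ∨ (a.toNat = a'.toNat ∧ (b.toNat < b'.toNat ∨ (b.toNat = b'.toNat ∧
      (d.toNat < d'.toNat ∨ (d.toNat = d'.toNat ∧ (e.toNat < e'.toNat ∨ e.toNat = e'.toNat)))))) := by
    rcases lt_or_eq_of_le hle with hlt | heq
    · rw [List.cons_lt_cons_iff] at hlt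
      rcases hlt with h1 | ⟨h1, h2⟩
      · exact Or.inl h1
      rw [List.cons_lt_cons_iff] at h2
      rcases h2 with h2 | ⟨h2, h3⟩
      · exact Or.inr ⟨congrArg Char.toNat h1, Or.inl h2⟩
      rw [List.cons_lt_cons_iff] at h3
      rcases h3 with h3 | ⟨h3, h4⟩
      · exact absurd h3 (by decide)
      rw [List.cons_lt_cons_iff] at h4
      rcases h4 with h4 | ⟨h4, h5⟩
      · exact Or.inr ⟨congrArg Char.toNat h1, Or.inr ⟨congrArg Char.toNat h2, Or.inl h4⟩⟩
      rw [List.cons_lt_cons_iff] at h5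
      rcases h5 with h5 | ⟨h5, h6⟩
      · exact Or.inr ⟨congrArg Char.toNat h1, Or.inr ⟨congrArg Char.toNat h2,
          Or.inr ⟨congrArg Char.toNat h4, Or.inl h5⟩⟩⟩
      · exact absurd h6 (lt_irrefl _)
    · simp only [List.cons.injEq] at heq
      obtain ⟨h1, h2, _, h4, h5, _⟩ := heq
      exact Or.inr ⟨congrArg Char.toNat h1, Or.inr ⟨congrArg Char.toNat h2,
        Or.inr ⟨congrArg Char.toNat h4, Or.inr (congrArg Char.toNat h5)⟩⟩⟩
  omega

-- the number of crew with arrival minute ≤ bus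
def pvCnt (crew : List Int) (bus : Int) : Int := (crew.countP (fun c => decide (c ≤ bus)) : Int)

lemma pvCnt_le_len (crew : List Int) (bus : Int) : pvCnt crew bus ≤ (crew.length : Int) := by
  simpa [pvCnt] using (Int.ofNat_le.mpr (List.countP_le_length (l := crew)))

-- B's "sum(1 for c in crew if c <= bus)" computes pvCnt
lemma pv_sum_eq_cnt (crew : List Int) (bus : Int) : ∀ acc : Int,
    crew.foldl (fun (acc : Int) c => if c ≤ bus then acc + 1 else acc) acc
      = acc + pvCnt crew bus := by
  induction crew with
  | nil => intro acc; simp [pvCnt]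
  | cons c cs ih =>
    intro acc
    by_cases h : c ≤ bus
    · simp only [List.foldl_cons, if_pos h, ih, pvCnt, List.countP_cons, decide_eq_true_eq,
        if_pos h]
      push_cast; omega
    · simp only [List.foldl_cons, if_neg h, ih, pvCnt, List.countP_cons, decide_eq_true_eq,
        if_neg h]
      push_cast; omega

-- in a sorted list the elements ≤ bus are exactly the first pvCnt positions
lemma pv_sorted_count (crew : List Int) (hs : crew.Pairwise (· ≤ ·)) (bus : Int) :
    ∀ j : Nat, (hj : j < crew.length) → (crew[j] ≤ bus ↔ (j : Int) < pvCnt crew bus) := by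
  induction crew with
  | nil => intro j hj; simp at hj
  | cons c cs ih =>
    rw [List.pairwise_cons] at hs
    intro j hj
    by_cases hcb : c ≤ bus
    · have hcnt : pvCnt (c :: cs) bus = pvCnt cs bus + 1 := by
        simp [pvCnt, hcb]
      cases j with
      | zero =>
        have h0 : (0:Int) ≤ pvCnt cs bus := by simp [pvCnt]
        simp only [List.getElem_cons_zero, hcnt]
        exact ⟨fun _ => by omega, fun _ => hcb⟩
      | succ j =>
        have hih := ih hs.2 j (by simpa using hj)
        simp only [List.getElem_cons_succ, hcnt]
        constructor
        · intro h; have := hih.mp h; push_cast; omega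
        · intro h; exact hih.mpr (by push_cast at h ⊢; omega)
    · have hall : ∀ x ∈ cs, ¬ x ≤ bus := fun x hx h => hcb (le_trans (hs.1 x hx) h)
      have hz : cs.countP (fun c => decide (c ≤ bus)) = 0 :=
        List.countP_eq_zero.mpr (fun x hx => by simp [hall x hx])
      have hcnt : pvCnt (c :: cs) bus = 0 := by simp [pvCnt, hcb, hz]
      rw [hcnt]
      cases j with
      | zero => simpa using hcb
      | succ j =>
        simp only [List.getElem_cons_succ]
        constructor
        · intro h; exact absurd h (hall _ (List.getElem_mem _))
        · intro h; omega

lemma pv_while_spec (crew : List Int) (hs : crew.Pairwise (· ≤ ·)) (m bus : Int) :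
    ∀ (idx count : Int), 0 ≤ idx → 0 ≤ count → count ≤ m →
    pvWhileA crew m bus idx count =
      (min (max idx (pvCnt crew bus)) (idx + (m - count)),
       count + (min (max idx (pvCnt crew bus)) (idx + (m - count)) - idx)) := by
  intro idx count h0 hc hcm
  induction hfuel : ((crew.length : Int) - idx).toNat using Nat.strong_induction_on
    generalizing idx count with
  | _ fuel ih =>
  rw [pvWhileA]
  have hlen := pvCnt_le_len crew bus
  have hcnt0 : (0:Int) ≤ pvCnt crew bus := by simp [pvCnt]
  split
  · next hguard =>
    have hjlt : idx.toNat < crew.length := by omega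
    have hget : PySem.List.pyGetD crew idx 0 = crew[idx.toNat] :=
      PySem.List.pyGetD_eq_getElem crew 0 h0 (by omega)
    have hchar := pv_sorted_count crew hs bus idx.toNat hjlt
    dsimp only
    split
    · next htake =>
      obtain ⟨h1, h2⟩ := htake
      rw [hget] at h2
      have hidxlt : idx < pvCnt crew bus := by
        have := hchar.mp h2; omega
      rw [ih (((crew.length : Int) - (idx + 1)).toNat) (by omega) (idx + 1) (count + 1)
        (by omega) (by omega) (by omega) rfl]
      simp only [Prod.mk.injEq]; constructor <;> omega
    · next hstop =>
      rw [hget] at hstop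
      push_neg at hstop
      by_cases hcm' : count < m
      · have hnb : ¬ crew[idx.toNat] ≤ bus := not_le.mpr (hstop hcm')
        have hge : pvCnt crew bus ≤ idx := by
          by_contra hlt
          exact hnb (hchar.mpr (by omega))
        simp only [Prod.mk.injEq]; constructor <;> omega
      · simp only [Prod.mk.injEq]; constructor <;> omega
  · next hguard =>
    have : (crew.length : Int) ≤ idx := by omega
    simp only [Prod.mk.injEq]; constructor <;> omega

-- A's per-bus step (pointer + while) equals B's per-bus step (count + clamp), fold-wise
lemma pv_fold_eq (crew : List Int) (hs : crew.Pairwise (· ≤ ·)) (m t : Int) (hm : 0 ≤ m) :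
    ∀ (ks : List Int) (i a : Int), 0 ≤ i → i ≤ (crew.length : Int) →
    ks.foldl (fun (x : Int × Int) y =>
        if (pvWhileA crew m (540 + y * t) x.1 0).2 < m then
          ((pvWhileA crew m (540 + y * t) x.1 0).1, 540 + y * t)
        else
          if (pvWhileA crew m (540 + y * t) x.1 0).2 = m then
            ((pvWhileA crew m (540 + y * t) x.1 0).1,
              PySem.List.pyGetD crew ((pvWhileA crew m (540 + y * t) x.1 0).1 - 1) 0 - 1)
          else ((pvWhileA crew m (540 + y * t) x.1 0).1, x.2)) (i, a)
      = ks.foldl (fun (st : Int × Int) k =>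
          (min (max (pvCnt crew (540 + k * t)) st.1) (st.1 + m),
            if min (max (pvCnt crew (540 + k * t)) st.1) (st.1 + m) - st.1 < m then 540 + k * t
            else PySem.List.pyGetD crew
              (min (max (pvCnt crew (540 + k * t)) st.1) (st.1 + m) - 1) 0 - 1)) (i, a) := by
  intro ks
  induction ks with
  | nil => intro i a _ _; rfl
  | cons k ks ih =>
    intro i a h0 hl
    have hw := pv_while_spec crew hs m (540 + k * t) i 0 h0 (le_refl 0) hm
    have hlen := pvCnt_le_len crew (540 + k * t)
    have hcnt0 : (0:Int) ≤ pvCnt crew (540 + k * t) := by simp [pvCnt]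
    set reach := min (max (pvCnt crew (540 + k * t)) i) (i + m) with hreach
    have hw' : pvWhileA crew m (540 + k * t) i 0 = (reach, reach - i) := by
      rw [hw]; simp only [Prod.mk.injEq]; constructor <;> omega
    simp only [List.foldl_cons, hw']
    by_cases hlt : reach - i < m
    · rw [if_pos hlt, if_pos hlt]
      exact ih reach _ (by omega) (by omega)
    · have heq : reach - i = m := by omega
      rw [if_neg hlt, if_pos heq, if_neg hlt]
      exact ih reach _ (by omega) (by omega)

-- ===== VERDICT (by name: the statement is the Claim_ definition above) =====
theorem solution_spec : Claim_equal_solution := by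
  intro n t m timetable _dom hpre
  obtain ⟨hmn, hgood⟩ := hpre
  show solution n t m timetable = solution_alt n t m timetable
  have hBA : (fun s =>
      (PySem.Int.ofStr? (PySem.Str.slice s (some 0) (some 2))).getD 0 * 60
        + (PySem.Int.ofStr? (PySem.Str.slice s (some 3) (some 5))).getD 0) = pvMinuteA := rfl
  have h540 : pvMinuteA "09:00" = 540 := by decide
  set sortedT := PySem.List.sorted timetable (fun x => x) false with hsT
  have hgood' : ∀ s ∈ sortedT, pvGoodTime s = true := by
    intro s hsmem
    exact hgood s ((PySem.List.mem_sorted timetable (fun x => x) false s).mp hsmem)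
  have hps : sortedT.Pairwise (· ≤ ·) := PySem.List.sorted_pairwise timetable (fun x => x)
  set crew := sortedT.map pvMinuteA with hcrew
  have hs : crew.Pairwise (· ≤ ·) := by
    rw [hcrew, List.pairwise_map]
    refine List.Pairwise.imp_of_mem ?_ hps
    intro a b hamem hbmem hab
    exact pv_minute_mono (hgood' a hamem) (hgood' b hbmem) hab
  have hlen0 : (0:Int) ≤ (crew.length : Int) := by positivity
  rw [solution, solution_alt, hBA]
  simp only [h540]
  rw [← hsT, ← hcrew]
  simp only [List.foldl_map, pv_sum_eq_cnt, zero_add]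
  by_cases hn : n ≤ 0
  · rw [PySem.List.pyRange_one_eq_nil (by omega)]
    rfl
  · have hm : 0 ≤ m := by omega
    rw [pv_fold_eq crew hs m t hm (PySem.List.pyRange 0 n 1) 0 0 (le_refl 0) hlen0]
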